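-- pv_equiv track=rewrite | github.com/gyuhwanhwang/algorithm | programmers/level_1/3진법뒤집기.py | solution
-- ===== SOURCE A (Python) =====
-- def solution(n):
--     three = ""
--     answer = 0
--     while n >= 3:
--         n, R = divmod(n, 3)
--         three = str(R) + three
--     three = str(n) + three
--
--     for n, number in enumerate(three):
--         if number != '0':
--             answer += int(number) * 3**n
--     return answer
-- ===== SOURCE B (Python) =====
-- def solution(n):
--     answer = 0
--     while n > 0:
--         n, r = divmod(n, 3)
--         answer = answer * 3 + r
--     return answer
-- ===== Notes on version B (the rewrite author's own statement) =====
-- stated objective: simpler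
-- what changed: Replaced the two-pass build-a-base-3-string-then-reinterpret-with-powers logic by a single Horner loop that accumulates the reversed base-3 value directly, with no string and no power computation.
import Mathlib
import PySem

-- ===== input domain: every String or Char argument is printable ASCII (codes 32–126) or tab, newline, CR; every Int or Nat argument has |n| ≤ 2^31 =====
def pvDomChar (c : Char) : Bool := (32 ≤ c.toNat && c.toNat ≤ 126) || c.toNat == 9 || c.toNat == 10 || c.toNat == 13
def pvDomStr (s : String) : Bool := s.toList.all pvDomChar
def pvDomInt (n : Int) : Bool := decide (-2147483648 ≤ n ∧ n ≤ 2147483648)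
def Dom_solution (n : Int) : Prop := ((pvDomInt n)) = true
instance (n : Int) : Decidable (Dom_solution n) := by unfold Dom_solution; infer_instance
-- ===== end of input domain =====

-- B replaces A's two-pass build-a-base-3-string-then-reinterpret logic with a single Horner loop (simpler).


-- termination measure for both while-loops (cited by the ports' decreasing_by)
theorem pvFdiv3_toNat_lt {n : Int} (h : 0 < n) :
    (PySem.Int.floordiv n 3).toNat < n.toNat := by
  rw [PySem.Int.floordiv_eq_ediv_of_pos (by norm_num)]
  omega

-- ===== PORT A =====
-- A's 'while n >= 3' loop, building the base-3 string (as List Char) by prepending str(R)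
def pvWhileA (n : Int) (three : List Char) : List Char :=
  if _h : 3 ≤ n then
    pvWhileA (PySem.Int.floordiv n 3) (PySem.Int.toChars (PySem.Int.mod n 3) ++ three)
  else
    PySem.Int.toChars n ++ three
termination_by n.toNat
decreasing_by exact pvFdiv3_toNat_lt (by omega)

def solution (n : Int) : Int :=
  let three : List Char := pvWhileA n []
  -- for n, number in enumerate(three): if number != '0': answer += int(number) * 3**n
  -- int(number) ported as (ofChars? [number]).getD 0: total form, exact under Pre_ (digit chars only)
  (PySem.List.enumerate three 0).foldl
    (fun answer p =>
      if p.2 ≠ '0' then answer + (PySem.Int.ofChars? [p.2]).getD 0 * 3 ^ p.1.toNat else answer) 0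

-- ===== PORT B =====
-- B's 'while n > 0: n, r = divmod(n, 3); answer = answer * 3 + r'
def pvLoopB (n answer : Int) : Int :=
  if h : 0 < n then
    pvLoopB (PySem.Int.floordiv n 3) (answer * 3 + PySem.Int.mod n 3)
  else answer
termination_by n.toNat
decreasing_by exact pvFdiv3_toNat_lt h

def solution_alt (n : Int) : Int := pvLoopB n 0

-- ===== PRECONDITION & SPEC =====
-- Pre_ excludes exactly n < 0: there A raises ValueError (int('-') on the sign character of str(n)).
def Pre_solution (n : Int) : Prop := 0 ≤ n
instance (n : Int) : Decidable (Pre_solution n) := by unfold Pre_solution; infer_instance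
def pvWitness_solution : Int := 5

def Spec_solution (n : Int) (out : Int) : Prop := out = solution_alt n
instance (n : Int) (out : Int) : Decidable (Spec_solution n out) := by unfold Spec_solution; infer_instance

-- ===== CLAIM (what is proved, stated in full; the proofs are below) =====
def Claim_equal_solution : Prop := ∀ (n : Int), Dom_solution n → Pre_solution n → Spec_solution n (solution n)

-- ===== LEMMAS AND PROOFS =====

-- A's for-loop fold, named for the proofs (definitionally solution's fold)
def pvF (cs : List Char) : Int :=
  (PySem.List.enumerate cs 0).foldl
    (fun answer p =>
      if p.2 ≠ '0' then answer + (PySem.Int.ofChars? [p.2]).getD 0 * 3 ^ p.1.toNat else answer) 0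

theorem pvWhileA_append (n : Int) (three : List Char) :
    pvWhileA n three = pvWhileA n [] ++ three := by
  suffices h : ∀ (k : Nat) (m : Int), m.toNat ≤ k → ∀ t, pvWhileA m t = pvWhileA m [] ++ t from
    h n.toNat n le_rfl three
  intro k
  induction k with
  | zero =>
      intro m hm t
      have h3 : ¬ 3 ≤ m := by omega
      rw [pvWhileA.eq_def m t, pvWhileA.eq_def m []]
      simp [h3]
  | succ k ih =>
      intro m hm t
      by_cases h3 : 3 ≤ m
      · have hlt : (PySem.Int.floordiv m 3).toNat ≤ k := by
          have := pvFdiv3_toNat_lt (show (0:Int) < m by omega); omega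
        rw [pvWhileA.eq_def m t, pvWhileA.eq_def m []]
        simp only [h3, dite_true]
        rw [ih _ hlt, ih _ hlt (PySem.Int.toChars (PySem.Int.mod m 3) ++ [])]
        simp
      · rw [pvWhileA.eq_def m t, pvWhileA.eq_def m []]; simp [h3]

theorem pvMod3_cases (n : Int) :
    PySem.Int.mod n 3 = 0 ∨ PySem.Int.mod n 3 = 1 ∨ PySem.Int.mod n 3 = 2 := by
  have h1 := PySem.Int.mod_nonneg n (b := 3) (by norm_num)
  have h2 := PySem.Int.mod_lt n (b := 3) (by norm_num)
  omega

-- appending one digit character d (0 ≤ d < 3) to A's string adds d * 3^(length) to A's fold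
theorem pvF_append_digit (cs : List Char) (d : Int)
    (hd : d = 0 ∨ d = 1 ∨ d = 2) :
    pvF (cs ++ PySem.Int.toChars d) = pvF cs + d * 3 ^ cs.length := by
  unfold pvF
  rw [PySem.List.enumerate_append, List.foldl_append]
  rcases hd with h | h | h <;> subst h
  · have hc : PySem.Int.toChars (0 : Int) = ['0'] := by decide
    rw [hc]
    simp [PySem.List.enumerate_cons, PySem.List.enumerate_nil]
  · have hc : PySem.Int.toChars (1 : Int) = ['1'] := by decide
    have hv : (PySem.Int.ofChars? ['1']).getD 0 = 1 := by decide
    rw [hc]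
    simp [PySem.List.enumerate_cons, PySem.List.enumerate_nil, hv]
  · have hc : PySem.Int.toChars (2 : Int) = ['2'] := by decide
    have hv : (PySem.Int.ofChars? ['2']).getD 0 = 2 := by decide
    rw [hc]
    simp [PySem.List.enumerate_cons, PySem.List.enumerate_nil, hv]

theorem pvLen_step (m : Int) (h3 : 3 ≤ m) :
    (pvWhileA m []).length = (pvWhileA (PySem.Int.floordiv m 3) []).length + 1 := by
  rw [pvWhileA.eq_def m []]
  simp only [h3, dite_true]
  rw [pvWhileA_append]
  rcases pvMod3_cases m with hd | hd | hd <;> rw [hd] <;> simp <;> decide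

theorem pvLen_base (m : Int) (h0 : 0 ≤ m) (h3 : ¬ 3 ≤ m) :
    (pvWhileA m []).length = 1 := by
  rw [pvWhileA.eq_def m []]
  simp only [h3, dite_false]
  interval_cases m <;> decide

-- B's loop with an accumulator: Horner form
theorem pvLoopB_acc (n : Int) (hn : 0 < n) (acc : Int) :
    pvLoopB n acc = acc * 3 ^ (pvWhileA n []).length + pvLoopB n 0 := by
  suffices h : ∀ (k : Nat) (m : Int), m.toNat ≤ k → 0 < m → ∀ acc : Int,
      pvLoopB m acc = acc * 3 ^ (pvWhileA m []).length + pvLoopB m 0 from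
    h n.toNat n le_rfl hn acc
  intro k
  induction k with
  | zero => intro m hm hp; omega
  | succ k ih =>
      intro m hm hp acc
      by_cases h3 : 3 ≤ m
      · have hfd : 0 < PySem.Int.floordiv m 3 := by
          rw [PySem.Int.floordiv_eq_ediv_of_pos (by norm_num)]; omega
        have hlt : (PySem.Int.floordiv m 3).toNat ≤ k := by
          have := pvFdiv3_toNat_lt hp; omega
        rw [pvLoopB.eq_def m acc, pvLoopB.eq_def m 0]
        simp only [hp, dite_true]
        rw [ih _ hlt hfd, ih _ hlt hfd (0 * 3 + PySem.Int.mod m 3), pvLen_step m h3]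
        ring
      · have hfd : PySem.Int.floordiv m 3 = 0 := by
          rw [PySem.Int.floordiv_eq_ediv_of_pos (by norm_num)]; omega
        have hmod : PySem.Int.mod m 3 = m := by
          have := PySem.Int.floordiv_mul_add_mod m 3
          rw [hfd] at this; omega
        rw [pvLoopB.eq_def m acc, pvLoopB.eq_def m 0]
        simp only [hp, dite_true]
        rw [hfd, pvLoopB.eq_def 0 (acc * 3 + PySem.Int.mod m 3), pvLoopB.eq_def 0 (0 * 3 + PySem.Int.mod m 3)]
        simp only [lt_irrefl, dite_false]
        rw [pvLen_base m (by omega) h3, hmod]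
        ring

-- main equivalence on 0 ≤ n
theorem pvMain (n : Int) (hn : 0 ≤ n) : pvF (pvWhileA n []) = pvLoopB n 0 := by
  suffices h : ∀ (k : Nat) (m : Int), m.toNat ≤ k → 0 ≤ m → pvF (pvWhileA m []) = pvLoopB m 0 from
    h n.toNat n le_rfl hn
  intro k
  induction k with
  | zero =>
      intro m hm h0
      have hm0 : m = 0 := by omega
      subst hm0
      rw [pvWhileA.eq_def, pvLoopB.eq_def]
      norm_num
      decide
  | succ k ih =>
      intro m hm h0
      by_cases h3 : 3 ≤ m
      · have hfd0 : 0 ≤ PySem.Int.floordiv m 3 := by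
          rw [PySem.Int.floordiv_eq_ediv_of_pos (by norm_num)]; omega
        have hfd : 0 < PySem.Int.floordiv m 3 := by
          rw [PySem.Int.floordiv_eq_ediv_of_pos (by norm_num)]; omega
        have hlt : (PySem.Int.floordiv m 3).toNat ≤ k := by
          have := pvFdiv3_toNat_lt (show (0:Int) < m by omega); omega
        rw [pvWhileA.eq_def m []]
        simp only [h3, dite_true]
        rw [pvWhileA_append]
        simp only [List.append_nil]
        rw [pvF_append_digit _ _ (pvMod3_cases m), ih _ hlt hfd0]
        rw [pvLoopB.eq_def m 0]
        simp only [show (0:Int) < m by omega, dite_true]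
        rw [pvLoopB_acc _ hfd (0 * 3 + PySem.Int.mod m 3)]
        ring
      · rw [pvWhileA.eq_def m []]
        simp only [h3, dite_false]
        interval_cases m
        · rw [pvLoopB.eq_def]; norm_num; decide
        · rw [pvLoopB.eq_def]
          norm_num
          rw [pvLoopB.eq_def]
          norm_num
          decide
        · rw [pvLoopB.eq_def]
          norm_num
          rw [pvLoopB.eq_def]
          norm_num
          decide

-- ===== VERDICT (by name: the statement is the Claim_ definition above) =====
theorem solution_spec : Claim_equal_solution := by
  intro n _ hpre
  unfold Spec_solution solution solution_alt
  exact pvMain n hpre
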